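-- pv_equiv track=rewrite | github.com/Emint76/crab-control-plane | operations/harness-phase3/bin/emit_phase3_report.py | clamp_monotonic
-- ===== SOURCE A (Python) =====
-- def clamp_monotonic(values: dict[str, str]) -> dict[str, str]:
--     normalized: dict[str, str] = {}
--     previous: str | None = None
--     for key, value in values.items():
--         if previous is not None and value < previous:
--             value = previous
--         normalized[key] = value
--         previous = value
--     return normalized
-- ===== SOURCE B (Python) =====
-- def clamp_monotonic(values: dict[str, str]) -> dict[str, str]:
--     def pm(vals: list[str]) -> list[str]:
--         if len(vals) <= 1:
--             return vals
--         mid = len(vals) // 2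
--         left = pm(vals[:mid])
--         right = pm(vals[mid:])
--         m = left[-1]
--         return left + [v if m < v else m for v in right]
--     return dict(zip(values.keys(), pm(list(values.values()))))
-- ===== Notes on version B (the rewrite author's own statement) =====
-- stated objective: alternative
-- what changed: Replaces A's single fused loop with a carried 'previous' accumulator by a divide-and-conquer prefix-maximum: recursively clamp each half of the value list, then lift the right half by the left half's last (maximal) element, and finally zip the keys back onto the clamped values.
import Mathlib
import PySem

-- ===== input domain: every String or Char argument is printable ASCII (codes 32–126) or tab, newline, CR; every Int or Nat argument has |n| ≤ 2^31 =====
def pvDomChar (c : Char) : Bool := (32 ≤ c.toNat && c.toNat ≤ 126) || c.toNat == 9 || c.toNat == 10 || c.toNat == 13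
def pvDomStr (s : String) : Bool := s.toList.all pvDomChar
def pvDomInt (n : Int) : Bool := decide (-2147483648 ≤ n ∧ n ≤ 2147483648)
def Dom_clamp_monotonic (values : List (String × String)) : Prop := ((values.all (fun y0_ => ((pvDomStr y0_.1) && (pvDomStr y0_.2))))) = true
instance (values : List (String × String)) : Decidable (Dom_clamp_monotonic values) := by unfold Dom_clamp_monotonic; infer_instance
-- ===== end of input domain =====

-- B replaces A's single loop with a carried 'previous' by a divide-and-conquer prefix-maximum
-- over the value list, then zips the keys back on; alternative stateless decomposition.

-- ===== PORT A =====
def clamp_monotonic (values : List (String × String)) : List (String × String) :=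
  -- normalized = {}; previous = None; for key, value in values.items(): ...
  (values.foldl
    (fun (st : PySem.Dict String String × Option String) kv =>
      let value := match st.2 with
        | some prev => if kv.2 < prev then prev else kv.2
        | none => kv.2
      (st.1.insert kv.1 value, some value))
    (PySem.Dict.empty, none)).1.items

-- ===== PORT B =====
-- def pm(vals): if len(vals) <= 1: return vals; mid = len(vals)//2;
--   left = pm(vals[:mid]); right = pm(vals[mid:]); m = left[-1]
--   return left + [v if m < v else m for v in right]
-- (left[-1]: left is nonempty since mid >= 1 in this branch; getLast?.getD "" totalises)
def pvPmB (vals : List String) : List String :=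
  if _h : vals.length ≤ 1 then vals
  else
    let mid := vals.length / 2
    let left := pvPmB (PySem.List.slice vals none (some ((mid : Nat) : Int)))
    let right := pvPmB (PySem.List.slice vals (some ((mid : Nat) : Int)) none)
    let m := left.getLast?.getD ""
    left ++ right.map (fun v => if m < v then v else m)
  termination_by vals.length
  decreasing_by
  · rw [PySem.List.slice_to_natCast, List.length_take]
    omega
  · rw [PySem.List.slice_from_natCast, List.length_drop]
    omega

def clamp_monotonic_alt (values : List (String × String)) : List (String × String) :=
  -- return dict(zip(values.keys(), pm(list(values.values()))))
  (PySem.Dict.ofList ((values.map Prod.fst).zip (pvPmB (values.map Prod.snd)))).items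

-- ===== PRECONDITION & SPEC =====
def Spec_clamp_monotonic (values : List (String × String)) (out : List (String × String)) : Prop := out = clamp_monotonic_alt values
instance (values : List (String × String)) (out : List (String × String)) : Decidable (Spec_clamp_monotonic values out) := by unfold Spec_clamp_monotonic; infer_instance

-- ===== CLAIM =====
def Claim_equal_clamp_monotonic : Prop := ∀ (values : List (String × String)), Dom_clamp_monotonic values → Spec_clamp_monotonic values (clamp_monotonic values)

-- ===== LEMMAS AND PROOFS =====

-- the clamped value sequence: a prefix-maximum scan seeded with an optional previous value
def pvScan (p : Option String) : List String → List String
  | [] => []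
  | v :: vs =>
    match p with
    | some q => max q v :: pvScan (some (max q v)) vs
    | none => v :: pvScan (some v) vs

theorem pvIfMax (q v : String) : (if v < q then q else v) = max q v := by
  rcases le_total q v with h | h
  · rw [if_neg (not_lt.mpr h), max_eq_right h]
  · rw [max_eq_left h]
    by_cases hlt : v < q
    · rw [if_pos hlt]
    · rw [if_neg hlt]
      exact le_antisymm h (not_lt.mp hlt)

theorem pvIfMax' (m v : String) : (if m < v then v else m) = max m v := by
  rcases le_total m v with h | h
  · rw [max_eq_right h]
    by_cases hlt : m < v
    · rw [if_pos hlt]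
    · rw [if_neg hlt]
      exact le_antisymm h (not_lt.mp hlt)
  · rw [if_neg (not_lt.mpr h), max_eq_left h]

-- A's loop is: clamp the value stream with pvScan, then build the dict from the clamped pairs
theorem pvFoldA (l : List (String × String)) : ∀ (d : PySem.Dict String String) (p : Option String),
    (l.foldl
      (fun (st : PySem.Dict String String × Option String) kv =>
        let value := match st.2 with
          | some prev => if kv.2 < prev then prev else kv.2
          | none => kv.2
        (st.1.insert kv.1 value, some value))
      (d, p)).1
    = ((l.map Prod.fst).zip (pvScan p (l.map Prod.snd))).foldl
        (fun d kv => d.insert kv.1 kv.2) d := by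
  induction l with
  | nil => intro d p; simp [pvScan]
  | cons kv rest ih =>
    intro d p
    cases p with
    | none =>
      simp only [List.foldl_cons, List.map_cons, pvScan, List.zip_cons_cons]
      exact ih _ _
    | some q =>
      simp only [List.foldl_cons, List.map_cons, pvScan, List.zip_cons_cons]
      rw [← pvIfMax q kv.2]
      exact ih _ _

theorem pvScanLength (l : List String) : ∀ (p : Option String), (pvScan p l).length = l.length := by
  induction l with
  | nil => intro p; rfl
  | cons v vs ih =>
    intro p
    cases p <;> simp [pvScan, ih]

theorem pvScanMap (l : List String) : ∀ (q : String),
    pvScan (some q) l = (pvScan none l).map (max q) := by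
  induction l with
  | nil => intro q; rfl
  | cons v vs ih =>
    intro q
    simp only [pvScan, List.map_cons]
    rw [ih, ih v, List.map_map]
    have h : (max q ∘ max v) = max (max q v) := by
      funext x; simp [Function.comp, max_assoc]
    rw [h]

theorem pvLastOrCons (v : String) (X : List String) (p : Option String) :
    (v :: X).getLast?.or p = X.getLast?.or (some v) := by
  cases X with
  | nil => rfl
  | cons y ys =>
    rw [List.getLast?_cons_cons]
    have hs : ((y :: ys).getLast?).isSome = true := by
      simp [List.getLast?_isSome]
    cases hlast : (y :: ys).getLast? with
    | none => rw [hlast] at hs; simp at hs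
    | some z => rfl

-- splitting the scan at any point: the right part is seeded by the left part's last clamped value
theorem pvScanAppend (l : List String) : ∀ (r : List String) (p : Option String),
    pvScan p (l ++ r) = pvScan p l ++ pvScan ((pvScan p l).getLast?.or p) r := by
  induction l with
  | nil => intro r p; simp [pvScan]
  | cons v vs ih =>
    intro r p
    cases p with
    | none =>
      simp only [List.cons_append, pvScan]
      rw [ih r (some v), pvLastOrCons]
    | some q =>
      simp only [List.cons_append, pvScan]
      rw [ih r (some (max q v)), pvLastOrCons]

-- B's divide-and-conquer computes exactly the prefix-maximum scan
theorem pvPmEq (vals : List String) : pvPmB vals = pvScan none vals := by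
  induction hn : vals.length using Nat.strong_induction_on generalizing vals with
  | _ n ihn =>
    subst hn
    rw [pvPmB]
    by_cases h : vals.length ≤ 1
    · rw [dif_pos h]
      match vals, h with
      | [], _ => rfl
      | [v], _ => rfl
    · rw [dif_neg h]
      simp only [PySem.List.slice_to_natCast, PySem.List.slice_from_natCast]
      have hmid1 : 1 ≤ vals.length / 2 := by omega
      have hmidlt : vals.length / 2 < vals.length := by omega
      have hltake : (vals.take (vals.length / 2)).length < vals.length := by
        rw [List.length_take]; omega
      have hldrop : (vals.drop (vals.length / 2)).length < vals.length := by
        rw [List.length_drop]; omega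
      rw [ihn _ hltake _ rfl, ihn _ hldrop _ rfl]
      have hsplit := pvScanAppend (vals.take (vals.length / 2)) (vals.drop (vals.length / 2)) none
      rw [List.take_append_drop] at hsplit
      rw [hsplit]
      congr 1
      -- left scan is nonempty, so its getLast? is some z; then getD "" and .or none both give z
      have hne : (pvScan none (vals.take (vals.length / 2))).length ≠ 0 := by
        rw [pvScanLength, List.length_take]; omega
      have hs : ((pvScan none (vals.take (vals.length / 2))).getLast?).isSome = true := by
        rw [List.getLast?_isSome]
        intro hnil
        exact hne (by rw [hnil]; rfl)
      cases hlast : (pvScan none (vals.take (vals.length / 2))).getLast? with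
      | none => rw [hlast] at hs; simp at hs
      | some z =>
        simp only [hlast, Option.getD_some, Option.some_or]
        rw [pvScanMap]
        congr 1
        funext v
        rw [pvIfMax' z v]

theorem pvOfList_eq_foldl (pairs : List (String × String)) :
    PySem.Dict.ofList pairs = pairs.foldl (fun d kv => d.insert kv.1 kv.2) PySem.Dict.empty := by
  rfl

-- ===== VERDICT =====
theorem clamp_monotonic_spec : Claim_equal_clamp_monotonic := by
  intro values _
  unfold Spec_clamp_monotonic
  simp only [clamp_monotonic, clamp_monotonic_alt]
  rw [pvFoldA, pvPmEq, pvOfList_eq_foldl]
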